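-- pv_equiv track=rewrite | github.com/gabiacuna/Arqui2021-1 | Tarea 1/main.py | hammingToBin
-- ===== SOURCE A (Python) =====
-- def hammingToBin(n):   #Recibe n en hamming, lo retorna en binario
--
--     pot = 0
--     res = ''
--
--     for i in range(0,len(n)):
--         if not(2**pot == i):
--             res += n[i]
--         else:
--             pot += 1
--
--     return res
-- ===== SOURCE B (Python) =====
-- def hammingToBin(n):   #Recibe n en hamming, lo retorna en binario
--     res = n[0:1]
--     p = 1
--     while p < len(n):
--         res += n[p+1:2*p]
--         p *= 2
--     return res
-- ===== Notes on version B (the rewrite author's own statement) =====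
-- stated objective: alternative
-- what changed: Replaces A's per-index power-of-two equality test over every character with a loop over the O(log n) power-of-two boundaries p=1,2,4,... that concatenates the whole slices n[0:1] and n[p+1:2*p] between consecutive boundaries.
import Mathlib
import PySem

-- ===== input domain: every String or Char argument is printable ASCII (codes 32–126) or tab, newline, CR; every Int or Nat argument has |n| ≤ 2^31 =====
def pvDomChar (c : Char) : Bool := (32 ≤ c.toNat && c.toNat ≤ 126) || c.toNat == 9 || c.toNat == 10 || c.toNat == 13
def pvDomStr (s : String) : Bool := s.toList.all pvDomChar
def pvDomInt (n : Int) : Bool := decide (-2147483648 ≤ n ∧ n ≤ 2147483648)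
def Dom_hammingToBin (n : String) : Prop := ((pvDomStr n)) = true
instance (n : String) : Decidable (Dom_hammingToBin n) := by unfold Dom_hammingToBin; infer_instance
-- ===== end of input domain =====

-- B replaces A's per-index power-of-two test by a walk over the power-of-two boundaries,
-- taking the whole slice between consecutive boundaries (objective: alternative).

-- ===== PORT A =====
-- literal transliteration of A: for i in range(0, len(n)): if not(2**pot == i): res += n[i] else: pot += 1
def hammingToBin (n : String) : String :=
  let s := n.toList
  let st :=
    (PySem.List.pyRange 0 (PySem.Str.len n) 1).foldl
      (fun (st : Nat × List Char) i =>
        if ¬((2 : Int) ^ st.1 == i) then (st.1, st.2 ++ [PySem.List.pyGetD s i ' '])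
        else (st.1 + 1, st.2)) (0, [])
  String.mk st.2

-- ===== PORT B =====
-- while p < len(n): res += n[p+1:2*p]; p *= 2   (the '0 < p' conjunct is a totality guard; p starts at 1 and doubles)
def hammingAltLoop (s : List Char) (p : Nat) (res : List Char) : List Char :=
  if h : 0 < p ∧ p < s.length then
    hammingAltLoop s (2 * p) (res ++ PySem.List.slice s (some ((p : Int) + 1)) (some (2 * (p : Int))))
  else res
termination_by s.length - p
decreasing_by omega

def hammingToBin_alt (n : String) : String :=
  let s := n.toList
  String.mk (hammingAltLoop s 1 (PySem.List.slice s (some 0) (some 1)))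

-- ===== PRECONDITION & SPEC =====
def Spec_hammingToBin (n : String) (out : String) : Prop := out = hammingToBin_alt n
instance (n : String) (out : String) : Decidable (Spec_hammingToBin n out) := by unfold Spec_hammingToBin; infer_instance

-- ===== CLAIM (what is proved, stated in full; the proofs are below) =====
def Claim_equal_hammingToBin : Prop := ∀ (n : String), Dom_hammingToBin n → Spec_hammingToBin n (hammingToBin n)

-- ===== LEMMAS AND PROOFS =====

-- proof-side recursive description of A's loop from index i with parity counter pot
def auxA (s : List Char) (i pot : Nat) : List Char :=
  if i < s.length then
    (if 2 ^ pot = i then auxA s (i + 1) (pot + 1)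
     else s.getD i ' ' :: auxA s (i + 1) pot)
  else []
termination_by s.length - i

lemma auxA_of_ge (s : List Char) (i pot : Nat) (h : s.length ≤ i) : auxA s i pot = [] := by
  unfold auxA; simp [Nat.not_lt.mpr h]

-- A's foldl from index i equals res ++ auxA s i pot
lemma foldA (s : List Char) : ∀ (d i pot : Nat) (res : List Char), s.length - i ≤ d →
    ((PySem.List.pyRange (i : Int) (s.length : Int) 1).foldl
      (fun (st : Nat × List Char) j =>
        if ¬((2 : Int) ^ st.1 == j) then (st.1, st.2 ++ [PySem.List.pyGetD s j ' '])
        else (st.1 + 1, st.2)) (pot, res)).2 = res ++ auxA s i pot := by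
  intro d
  induction d with
  | zero =>
      intro i pot res h
      have hge : s.length ≤ i := by omega
      rw [PySem.List.pyRange_one_eq_nil (by exact_mod_cast hge), auxA_of_ge s i pot hge]
      simp
  | succ d ih =>
      intro i pot res h
      by_cases hi : i < s.length
      · rw [PySem.List.pyRange_one_cons (by exact_mod_cast hi), List.foldl_cons]
        rw [show ((i : Int) + 1) = ((i + 1 : Nat) : Int) by push_cast; ring]
        by_cases hp : 2 ^ pot = i
        · have hb : ((2 : Int) ^ pot == (i : Int)) = true := by
            have hcast : ((2 : Int) ^ pot) = (i : Int) := by exact_mod_cast congrArg (Nat.cast : Nat → Int) hp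
            simp [hcast]
        -- the step is a skip: pot increments, res unchanged
          rw [if_neg (by simp [hb])]
          rw [ih (i + 1) (pot + 1) res (by omega)]
          conv_rhs => rw [auxA]
          simp [hi, hp]
        · have hb : ((2 : Int) ^ pot == (i : Int)) = false := by
            simp only [beq_eq_false_iff_ne, ne_eq]
            intro hcast
            exact hp (by exact_mod_cast hcast)
          rw [if_pos (by simp [hb])]
          rw [ih (i + 1) pot (res ++ [PySem.List.pyGetD s (i : Int) ' ']) (by omega)]
          conv_rhs => rw [auxA]
          simp [hi, hp, PySem.List.pyGetD_natCast]
      · have hge : s.length ≤ i := by omega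
        rw [PySem.List.pyRange_one_eq_nil (by exact_mod_cast hge), auxA_of_ge s i pot hge]
        simp

-- between two consecutive powers of two A just copies characters
lemma auxA_run (s : List Char) : ∀ (d j pot : Nat), j + d = 2 ^ pot →
    auxA s j pot = (s.drop j).take (2 ^ pot - j) ++ auxA s (2 ^ pot) pot := by
  intro d
  induction d with
  | zero =>
      intro j pot h
      simp [← h]
  | succ d ih =>
      intro j pot h
      have hj : j < 2 ^ pot := by omega
      by_cases hl : j < s.length
      · conv_lhs => rw [auxA]
        rw [if_pos hl, if_neg (by omega)]
        rw [ih (j + 1) pot (by omega)]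
        have hdrop : s.drop j = s[j] :: s.drop (j + 1) := List.drop_eq_getElem_cons hl
        rw [hdrop]
        have hgd : s.getD j ' ' = s[j] := by simp [List.getD_eq_getElem?_getD, hl]
        rw [hgd]
        have htake : (s[j] :: s.drop (j + 1)).take (2 ^ pot - j)
            = s[j] :: (s.drop (j + 1)).take (2 ^ pot - (j + 1)) := by
          have h1 : 2 ^ pot - j = (2 ^ pot - (j + 1)) + 1 := by omega
          rw [h1, List.take_succ_cons]
        rw [htake]; simp
      · rw [auxA_of_ge s j pot (by omega), auxA_of_ge s (2 ^ pot) pot (by omega)]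
        simp [List.drop_eq_nil_of_le (by omega : s.length ≤ j)]

-- B's boundary loop from p = 2^pot computes exactly A's remaining output
lemma altLoop_eq (s : List Char) : ∀ (d pot : Nat) (res : List Char), s.length - 2 ^ pot ≤ d →
    hammingAltLoop s (2 ^ pot) res = res ++ auxA s (2 ^ pot) pot := by
  intro d
  induction d with
  | zero =>
      intro pot res h
      have hge : s.length ≤ 2 ^ pot := by
        have := Nat.one_le_two_pow (n := pot); omega
      unfold hammingAltLoop
      rw [dif_neg (by omega), auxA_of_ge s _ pot hge]
      simp
  | succ d ih =>
      intro pot res h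
      have hpow : 2 ^ (pot + 1) = 2 * 2 ^ pot := by ring
      have hp0 : 0 < 2 ^ pot := Nat.two_pow_pos pot
      by_cases hl : 2 ^ pot < s.length
      · unfold hammingAltLoop
        rw [dif_pos ⟨hp0, hl⟩]
        have hslice : PySem.List.slice s (some ((2 ^ pot : Nat) + 1 : Int)) (some (2 * (2 ^ pot : Nat) : Int))
            = (s.drop (2 ^ pot + 1)).take (2 ^ (pot + 1) - (2 ^ pot + 1)) := by
          rw [show ((2 ^ pot : Nat) + 1 : Int) = ((2 ^ pot + 1 : Nat) : Int) by push_cast; ring,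
              show (2 * (2 ^ pot : Nat) : Int) = ((2 ^ (pot + 1) : Nat) : Int) by push_cast; ring]
          rw [PySem.List.slice_natCast]
        rw [hslice, show 2 * 2 ^ pot = 2 ^ (pot + 1) from hpow.symm,
            ih (pot + 1) _ (by omega)]
        -- right side: one skip step of auxA, then a copy run to the next boundary
        conv_rhs => rw [auxA]
        rw [if_pos hl, if_pos rfl,
            auxA_run s (2 ^ (pot + 1) - (2 ^ pot + 1)) (2 ^ pot + 1) (pot + 1) (by omega)]
        simp
      · unfold hammingAltLoop
        rw [dif_neg (by omega), auxA_of_ge s _ pot (by omega)]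
        simp

-- the leading character n[0:1] together with the run from index 1 is A's output from index 0
lemma head_eq (s : List Char) :
    PySem.List.slice s none (some 1) ++ auxA s 1 0 = auxA s 0 0 := by
  have hs : PySem.List.slice s none (some 1) = s.take 1 := by
    simpa using PySem.List.slice_to_natCast s 1
  rw [hs]
  conv_rhs => rw [auxA]
  cases s with
  | nil => simp [auxA_of_ge]
  | cons a t => simp

-- ===== VERDICT (by name: the statement is the Claim_ definition above) =====
theorem hammingToBin_spec : Claim_equal_hammingToBin := by
  intro n _
  unfold Spec_hammingToBin hammingToBin hammingToBin_alt
  simp only [PySem.Str.len_eq]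
  have hA := foldA n.toList n.toList.length 0 0 [] (by omega)
  push_cast at hA
  rw [hA]
  rw [show (1 : Nat) = 2 ^ 0 by norm_num,
      altLoop_eq n.toList n.toList.length 0 _ (by omega)]
  norm_num
  rw [head_eq]
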